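-- pv_equiv track=rewrite | github.com/Vedang-P/Diffusion-visualizer-v2 | data-generator/generate.py | infer_meaningful_token_count
-- ===== SOURCE A (Python) =====
-- def infer_meaningful_token_count(
--     tokens: list[str],
--     token_ids: list[int],
--     special_ids: set[int],
-- ) -> int:
--     special_tokens = {
--         "",
--         "<|endoftext|>",
--         "</s>",
--         "<s>",
--         "<pad>",
--         "[PAD]",
--     }
--
--     started = False
--     count = 0
--
--     for token, token_id in zip(tokens, token_ids):
--         cleaned = token.strip()
--         is_special = token_id in special_ids or cleaned in special_tokens
--         if is_special:
--             if started:
--                 break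
--             continue
--         started = True
--         count += 1
--
--     return max(1, min(count, len(tokens)))
-- ===== SOURCE B (Python) =====
-- SPECIAL_TOKENS = {"", "<|endoftext|>", "</s>", "<s>", "<pad>", "[PAD]"}
--
--
-- def infer_meaningful_token_count(tokens, token_ids, special_ids):
--     # Stage 1: boolean mask marking the special positions.
--     flags = [tid in special_ids or tok.strip() in SPECIAL_TOKENS
--              for tok, tid in zip(tokens, token_ids)]
--     # Stage 2: run-length encode the mask.
--     runs = []
--     for f in flags:
--         if runs and runs[-1][0] == f:
--             runs[-1][1] += 1
--         else:
--             runs.append([f, 1])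
--     # Stage 3: the answer is the length of the first meaningful (False) run,
--     # clamped below by 1 (A's min(count, len(tokens)) is always redundant).
--     for flag, n in runs:
--         if not flag:
--             return max(1, n)
--     return 1
-- ===== Notes on version B (the rewrite author's own statement) =====
-- stated objective: alternative
-- what changed: B replaces A's single flag-and-counter scan with early break by three staged passes: build a boolean special-mask over the zipped pairs, run-length encode the mask, and return the clamped length of the first non-special run; the redundant min(count, len(tokens)) disappears.
import Mathlib
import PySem

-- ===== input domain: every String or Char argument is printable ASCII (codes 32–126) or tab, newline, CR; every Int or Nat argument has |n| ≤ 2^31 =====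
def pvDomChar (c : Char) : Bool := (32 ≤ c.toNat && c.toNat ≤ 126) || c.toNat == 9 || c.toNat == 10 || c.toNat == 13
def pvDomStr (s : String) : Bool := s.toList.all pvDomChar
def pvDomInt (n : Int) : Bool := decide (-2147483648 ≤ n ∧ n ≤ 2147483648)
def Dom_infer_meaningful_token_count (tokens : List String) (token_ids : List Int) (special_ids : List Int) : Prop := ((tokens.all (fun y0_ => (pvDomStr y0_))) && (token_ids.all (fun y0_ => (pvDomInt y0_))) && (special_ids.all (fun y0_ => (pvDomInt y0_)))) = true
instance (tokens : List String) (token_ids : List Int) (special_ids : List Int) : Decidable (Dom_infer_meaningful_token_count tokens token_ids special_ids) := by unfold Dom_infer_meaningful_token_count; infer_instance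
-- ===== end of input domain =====

-- B computes the same value by three staged passes — special-mask, run-length encoding,
-- length of the first non-special run — instead of A's single flag-and-counter scan with
-- early break; objective: alternative. Equivalence is about the return value only.

-- ===== PORT A =====
-- A's loop: structural recursion over the zipped pairs carrying (started, count);
-- the `break` becomes returning count when a special pair is met after started.
def pvALoop (special_ids : List Int) (special_tokens : List String) :
    List (String × Int) → Bool → Int → Int
  | [], _, count => count
  | (token, tid) :: rest, started, count =>
    let cleaned := PySem.Str.strip token
    let is_special := special_ids.contains tid || special_tokens.contains cleaned
    if is_special then
      if started then count else pvALoop special_ids special_tokens rest started count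
    else pvALoop special_ids special_tokens rest true (count + 1)

def infer_meaningful_token_count (tokens : List String) (token_ids : List Int) (special_ids : List Int) : Int :=
  let special_tokens : List String := ["", "<|endoftext|>", "</s>", "<s>", "<pad>", "[PAD]"]
  let count := pvALoop special_ids special_tokens (tokens.zip token_ids) false 0
  max 1 (min count (tokens.length : Int))

-- ===== PORT B =====
def pvSpecialTokens : List String := ["", "<|endoftext|>", "</s>", "<s>", "<pad>", "[PAD]"]

def pvIsSpecial (special_ids : List Int) (p : String × Int) : Bool :=
  special_ids.contains p.2 || pvSpecialTokens.contains (PySem.Str.strip p.1)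

-- Stage-2 loop body: `runs[-1][1] += 1` if the last run has the same flag, else append
-- `[f, 1]` — transcribed as recursion down to the last element of `runs`.
def pvStep : List (Bool × Int) → Bool → List (Bool × Int)
  | [], f => [(f, 1)]
  | [(c, n)], f => if c = f then [(c, n + 1)] else [(c, n), (f, 1)]
  | x :: y :: r, f => x :: pvStep (y :: r) f

-- Stage-3 loop: first run with flag False yields max 1 n; falling through yields 1.
def pvFirstRun : List (Bool × Int) → Int
  | [] => 1
  | (f, n) :: t => if f then pvFirstRun t else max 1 n

def infer_meaningful_token_count_alt (tokens : List String) (token_ids : List Int) (special_ids : List Int) : Int :=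
  let flags := (tokens.zip token_ids).map (fun p => pvIsSpecial special_ids p)
  let runs := flags.foldl pvStep []
  pvFirstRun runs

-- ===== PRECONDITION & SPEC =====
def Spec_infer_meaningful_token_count (tokens : List String) (token_ids : List Int) (special_ids : List Int) (out : Int) : Prop := out = infer_meaningful_token_count_alt tokens token_ids special_ids
instance (tokens : List String) (token_ids : List Int) (special_ids : List Int) (out : Int) : Decidable (Spec_infer_meaningful_token_count tokens token_ids special_ids out) := by unfold Spec_infer_meaningful_token_count; infer_instance

-- ===== CLAIM (what is proved, stated in full; the proofs are below) =====
def Claim_equal_infer_meaningful_token_count : Prop := ∀ (tokens : List String) (token_ids : List Int) (special_ids : List Int), Dom_infer_meaningful_token_count tokens token_ids special_ids → Spec_infer_meaningful_token_count tokens token_ids special_ids (infer_meaningful_token_count tokens token_ids special_ids)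

-- ===== LEMMAS AND PROOFS =====

-- ---- A-side characterisation: A's loop counts the first non-special run ----

theorem pvALoop_cons (ids : List Int) (token : String) (tid : Int)
    (xs : List (String × Int)) (started : Bool) (c : Int) :
    pvALoop ids pvSpecialTokens ((token, tid) :: xs) started c
      = if pvIsSpecial ids (token, tid) then
          (if started then c else pvALoop ids pvSpecialTokens xs started c)
        else pvALoop ids pvSpecialTokens xs true (c + 1) := rfl

theorem pvALoop_started (ids : List Int) (L : List (String × Int)) (c : Int) :
    pvALoop ids pvSpecialTokens L true c
      = c + ((L.takeWhile (fun p => !(pvIsSpecial ids p))).length : Int) := by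
  induction L generalizing c with
  | nil => simp [pvALoop]
  | cons x xs ih =>
    obtain ⟨token, tid⟩ := x
    rw [pvALoop_cons]
    by_cases h : pvIsSpecial ids (token, tid) = true
    · simp [h]
    · simp only [Bool.not_eq_true] at h
      simp [h, ih]
      ring

theorem pvALoop_unstarted (ids : List Int) (L : List (String × Int)) (c : Int) :
    pvALoop ids pvSpecialTokens L false c
      = c + (((L.dropWhile (pvIsSpecial ids)).takeWhile (fun p => !(pvIsSpecial ids p))).length : Int) := by
  induction L generalizing c with
  | nil => simp [pvALoop]
  | cons x xs ih =>
    obtain ⟨token, tid⟩ := x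
    rw [pvALoop_cons]
    by_cases h : pvIsSpecial ids (token, tid) = true
    · simp [h, ih]
    · simp only [Bool.not_eq_true] at h
      simp [h, pvALoop_started]
      ring

theorem pvTakeWhile_le {α : Type} (p : α → Bool) (L : List α) :
    (L.takeWhile p).length ≤ L.length := by
  induction L with
  | nil => simp
  | cons x xs ih =>
    by_cases h : p x = true
    · simp [h]; omega
    · simp [h]

-- ---- B-side: the foldl builds the run-length encoding ----

-- reference RLE, built from the front
def pvMerge (b : Bool) : List (Bool × Int) → List (Bool × Int)
  | [] => [(b, 1)]
  | (c, n) :: r => if c = b then (b, n + 1) :: r else (b, 1) :: (c, n) :: r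

def pvRle : List Bool → List (Bool × Int)
  | [] => []
  | b :: t => pvMerge b (pvRle t)

theorem pvStep_merge_comm (b f : Bool) (R : List (Bool × Int)) (h : R ≠ []) :
    pvStep (pvMerge b R) f = pvMerge b (pvStep R f) := by
  match R with
  | [] => exact absurd rfl h
  | [(c, n)] =>
    by_cases hcb : c = b <;> by_cases hcf : c = f <;> by_cases hbf : b = f <;>
      simp_all [pvMerge, pvStep]
  | (c, n) :: y :: r =>
    by_cases hcb : c = b
    · subst hcb
      simp [pvMerge, pvStep]
    · simp [pvMerge, hcb, pvStep]

theorem pvStep_rle (P : List Bool) (f : Bool) :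
    pvStep (pvRle P) f = pvRle (P ++ [f]) := by
  induction P with
  | nil => simp [pvRle, pvStep, pvMerge]
  | cons b P' ih =>
    show pvStep (pvMerge b (pvRle P')) f = pvMerge b (pvRle (P' ++ [f]))
    rw [← ih]
    rcases hP : pvRle P' with _ | ⟨⟨c, n⟩, r⟩
    · by_cases hbf : b = f
      · simp [pvMerge, pvStep, hbf]
      · have hfb : ¬ f = b := fun h => hbf h.symm
        simp [pvMerge, pvStep, hbf, hfb]
    · exact pvStep_merge_comm b f _ (by simp)

theorem pvFoldl_rle (L P : List Bool) :
    List.foldl pvStep (pvRle P) L = pvRle (P ++ L) := by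
  induction L generalizing P with
  | nil => simp
  | cons f L' ih =>
    simp only [List.foldl_cons, pvStep_rle]
    rw [ih]
    simp

theorem pvMerge_ne_nil (b : Bool) (R : List (Bool × Int)) : pvMerge b R ≠ [] := by
  rcases R with _ | ⟨⟨c, n⟩, r⟩
  · simp [pvMerge]
  · by_cases h : c = b <;> simp [pvMerge, h]

theorem pvRle_nil_iff (t : List Bool) : pvRle t = [] → t = [] := by
  rcases t with _ | ⟨b, t'⟩
  · intro; rfl
  · intro h; exact absurd h (pvMerge_ne_nil b _)

-- the head run of the RLE is the head flag with the length of its leading run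
theorem pvRle_head (t : List Bool) (c : Bool) (n : Int) (r : List (Bool × Int))
    (h : pvRle t = (c, n) :: r) :
    t.head? = some c ∧ n = ((t.takeWhile (fun b => b == c)).length : Int) := by
  induction t generalizing c n r with
  | nil => simp [pvRle] at h
  | cons b t' ih =>
    rcases hP : pvRle t' with _ | ⟨⟨c', m⟩, r'⟩
    · have ht' : t' = [] := pvRle_nil_iff t' hP
      subst ht'
      simp [pvRle, pvMerge] at h
      obtain ⟨⟨rfl, rfl⟩, -⟩ := h
      simp
    · by_cases hcb : c' = b
      · subst hcb
        simp [pvRle, hP, pvMerge] at h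
        obtain ⟨⟨rfl, rfl⟩, rfl⟩ := h
        obtain ⟨hd, hm⟩ := ih c' m r' hP
        refine ⟨by simp, ?_⟩
        have htw : t'.takeWhile (fun b => b == c') = c' :: (t'.tail.takeWhile (fun b => b == c')) := by
          rcases t' with _ | ⟨x, t''⟩
          · simp at hd
          · simp at hd
            subst hd
            simp
        simp only [List.takeWhile_cons, beq_self_eq_true, if_true]
        simp only [htw] at hm ⊢
        simp at hm ⊢
        omega
      · simp [pvRle, hP, pvMerge, hcb] at h
        obtain ⟨⟨rfl, rfl⟩, -⟩ := h
        obtain ⟨hd, -⟩ := ih c' m r' hP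
        refine ⟨by simp, ?_⟩
        have htw : t'.takeWhile (fun x => x == b) = [] := by
          rcases t' with _ | ⟨x, t''⟩
          · simp
          · simp at hd
            subst hd
            simp [List.takeWhile_cons, hcb]
        simp [List.takeWhile_cons, htw]

theorem pvFirstRun_merge_true (R : List (Bool × Int)) :
    pvFirstRun (pvMerge true R) = pvFirstRun R := by
  rcases R with _ | ⟨⟨c, n⟩, r⟩
  · simp [pvMerge, pvFirstRun]
  · by_cases h : c = true <;> simp [pvMerge, h, pvFirstRun]

-- main B-side lemma: first-false-run of the RLE = clamped length of the first
-- non-special run after the leading special run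
theorem pvFirstRun_rle (flags : List Bool) :
    pvFirstRun (pvRle flags)
      = max 1 (((flags.dropWhile id).takeWhile (fun b => !b)).length : Int) := by
  induction flags with
  | nil => simp [pvRle, pvFirstRun]
  | cons b t ih =>
    cases b
    · -- head is meaningful (false): RHS counts 1 + the following false-run
      have hRhs : ((false :: t).dropWhile id).takeWhile (fun b => !b)
          = false :: t.takeWhile (fun b => !b) := by
        simp [List.takeWhile_cons]
      rcases hP : pvRle t with _ | ⟨⟨c, n⟩, r⟩
      · have ht : t = [] := pvRle_nil_iff t hP
        subst ht
        simp [pvRle, pvMerge, pvFirstRun]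
      · obtain ⟨hd, hn⟩ := pvRle_head t c n r hP
        cases c
        · -- first run of t is also false: it gets merged, length n + 1
          have hTake : t.takeWhile (fun b => !b) = t.takeWhile (fun b => b == false) := by
            have hfun : (fun b : Bool => !b) = (fun b : Bool => b == false) := by
              funext x; cases x <;> rfl
            rw [hfun]
          simp only [pvRle, hP, pvMerge, if_true, pvFirstRun, hRhs]
          simp [hTake, ← hn]
        · -- first run of t is true: t's takeWhile(not) is empty, answer 1
          have hTake : t.takeWhile (fun b => !b) = [] := by
            rcases t with _ | ⟨x, t'⟩
            · simp
            · simp at hd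
              subst hd
              simp
          simp only [pvRle, hP, pvMerge]
          simp [pvFirstRun, hTake]
    · -- head is special (true): both sides ignore it
      have : ((true :: t).dropWhile id) = t.dropWhile id := by simp
      rw [show pvRle (true :: t) = pvMerge true (pvRle t) from rfl,
          pvFirstRun_merge_true, ih, this]

-- bridging the flag mask back to the zipped pair list
theorem pvFlags_bridge (ids : List Int) (L : List (String × Int)) :
    (((L.map (fun p => pvIsSpecial ids p)).dropWhile id).takeWhile (fun b => !b)).length
      = ((L.dropWhile (pvIsSpecial ids)).takeWhile (fun p => !(pvIsSpecial ids p))).length := by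
  rw [List.dropWhile_map, List.takeWhile_map, List.length_map]
  rfl

theorem infer_meaningful_token_count_eq (tokens : List String) (token_ids : List Int) (special_ids : List Int) :
    infer_meaningful_token_count tokens token_ids special_ids
      = infer_meaningful_token_count_alt tokens token_ids special_ids := by
  unfold infer_meaningful_token_count infer_meaningful_token_count_alt
  set L := tokens.zip token_ids with hL
  have hA : pvALoop special_ids ["", "<|endoftext|>", "</s>", "<s>", "<pad>", "[PAD]"] L false 0
      = (((L.dropWhile (pvIsSpecial special_ids)).takeWhile (fun p => !(pvIsSpecial special_ids p))).length : Int) := by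
    rw [show (["", "<|endoftext|>", "</s>", "<s>", "<pad>", "[PAD]"] : List String) = pvSpecialTokens from rfl,
        pvALoop_unstarted]
    ring
  have hB : (L.map (fun p => pvIsSpecial special_ids p)).foldl pvStep []
      = pvRle (L.map (fun p => pvIsSpecial special_ids p)) := by
    have := pvFoldl_rle (L.map (fun p => pvIsSpecial special_ids p)) []
    simpa [pvRle] using this
  have hcnt := pvFlags_bridge special_ids L
  have hle : ((L.dropWhile (pvIsSpecial special_ids)).takeWhile (fun p => !(pvIsSpecial special_ids p))).length ≤ tokens.length := by
    calc ((L.dropWhile (pvIsSpecial special_ids)).takeWhile (fun p => !(pvIsSpecial special_ids p))).length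
        ≤ (L.dropWhile (pvIsSpecial special_ids)).length := pvTakeWhile_le _ _
      _ ≤ L.length := List.length_dropWhile_le _ _
      _ ≤ tokens.length := by rw [hL, List.length_zip]; omega
  simp only [hA, hB, pvFirstRun_rle, hcnt]
  omega

-- ===== VERDICT (by name: the statement is the Claim_ definition above) =====
theorem infer_meaningful_token_count_spec : Claim_equal_infer_meaningful_token_count := by
  intro tokens token_ids special_ids _
  exact infer_meaningful_token_count_eq tokens token_ids special_ids
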